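-- pv_equiv track=rewrite | github.com/strangeloopcanon/digital-enterprise-twin | vei/scenario_runner/runner.py | _focus_for_tool
-- ===== SOURCE A (Python) =====
-- def _focus_for_tool(tool: str) -> str:
--     for prefix in (
--         "slack",
--         "mail",
--         "docs",
--         "calendar",
--         "tickets",
--         "erp",
--         "crm",
--         "db",
--         "browser",
--         "okta",
--         "servicedesk",
--         "google_admin",
--         "siem",
--         "datadog",
--         "pagerduty",
--         "feature_flags",
--         "hris",
--         "jira",
--     ):
--         if tool.startswith(f"{prefix}."):
--             return prefix
--     if tool.startswith("salesforce.") or tool.startswith("hubspot."):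
--         return "crm"
--     if (
--         tool.startswith("xero.")
--         or tool.startswith("netsuite.")
--         or tool.startswith("dynamics.")
--         or tool.startswith("quickbooks.")
--     ):
--         return "erp"
--     return "browser"
-- ===== SOURCE B (Python) =====
-- _FOCUS_MAP = {
--     "slack": "slack",
--     "mail": "mail",
--     "docs": "docs",
--     "calendar": "calendar",
--     "tickets": "tickets",
--     "erp": "erp",
--     "crm": "crm",
--     "db": "db",
--     "browser": "browser",
--     "okta": "okta",
--     "servicedesk": "servicedesk",
--     "google_admin": "google_admin",
--     "siem": "siem",
--     "datadog": "datadog",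
--     "pagerduty": "pagerduty",
--     "feature_flags": "feature_flags",
--     "hris": "hris",
--     "jira": "jira",
--     "salesforce": "crm",
--     "hubspot": "crm",
--     "xero": "erp",
--     "netsuite": "erp",
--     "dynamics": "erp",
--     "quickbooks": "erp",
-- }
--
--
-- def _focus_for_tool(tool: str) -> str:
--     i = tool.find(".")
--     if i < 0:
--         return "browser"
--     return _FOCUS_MAP.get(tool[:i], "browser")
-- ===== Notes on version B (the rewrite author's own statement) =====
-- stated objective: simpler
-- what changed: Replaces the 24-branch startswith scan (a loop over 18 prefixes plus six extra startswith tests) by computing the segment before the first dot once and doing a single lookup in a module-level prefix-to-focus dict.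
import Mathlib
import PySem

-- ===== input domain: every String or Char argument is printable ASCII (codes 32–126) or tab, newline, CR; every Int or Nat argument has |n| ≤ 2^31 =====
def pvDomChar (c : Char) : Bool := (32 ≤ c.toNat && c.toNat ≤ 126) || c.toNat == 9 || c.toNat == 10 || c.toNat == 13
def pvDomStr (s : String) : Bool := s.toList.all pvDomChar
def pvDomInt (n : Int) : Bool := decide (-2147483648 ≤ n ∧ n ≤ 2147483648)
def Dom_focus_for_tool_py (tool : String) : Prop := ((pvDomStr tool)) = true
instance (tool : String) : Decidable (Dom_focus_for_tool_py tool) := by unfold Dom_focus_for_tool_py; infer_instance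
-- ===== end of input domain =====

-- B replaces A's linear startswith scan by one find of the first dot and a single table lookup (simpler/idiomatic; same observable behaviour).

-- ===== PORT A =====
-- the tuple A's for-loop iterates over
def pvPrefixes : List String := ["slack", "mail", "docs", "calendar", "tickets", "erp", "crm", "db", "browser", "okta", "servicedesk", "google_admin", "siem", "datadog", "pagerduty", "feature_flags", "hris", "jira"]

-- A's for-loop: first prefix p with tool.startswith(p + "."), else none
def pvFocusLoop (tool : String) : List String → Option String
  | [] => none
  | p :: ps => if PySem.Str.startswith tool (p ++ ".") then some p else pvFocusLoop tool ps

def focus_for_tool_py (tool : String) : String :=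
  match pvFocusLoop tool pvPrefixes with
  | some p => p
  | none =>
    if PySem.Str.startswith tool "salesforce." || PySem.Str.startswith tool "hubspot." then "crm"
    else if PySem.Str.startswith tool "xero." || PySem.Str.startswith tool "netsuite." ||
            PySem.Str.startswith tool "dynamics." || PySem.Str.startswith tool "quickbooks." then "erp"
    else "browser"

-- ===== PORT B =====
-- the module-level dict _FOCUS_MAP of Source B
def pvFocusMap : PySem.Dict String String := PySem.Dict.ofList [("slack", "slack"), ("mail", "mail"), ("docs", "docs"), ("calendar", "calendar"), ("tickets", "tickets"), ("erp", "erp"), ("crm", "crm"), ("db", "db"), ("browser", "browser"), ("okta", "okta"), ("servicedesk", "servicedesk"), ("google_admin", "google_admin"), ("siem", "siem"), ("datadog", "datadog"), ("pagerduty", "pagerduty"), ("feature_flags", "feature_flags"), ("hris", "hris"), ("jira", "jira"), ("salesforce", "crm"), ("hubspot", "crm"), ("xero", "erp"), ("netsuite", "erp"), ("dynamics", "erp"), ("quickbooks", "erp")]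

def focus_for_tool_py_alt (tool : String) : String :=
  let i := PySem.Str.find tool "."
  if i < 0 then "browser"
  else PySem.Dict.getD pvFocusMap (PySem.Str.slice tool none (some i)) "browser"

-- ===== PRECONDITION & SPEC =====
def Spec_focus_for_tool_py (tool : String) (out : String) : Prop := out = focus_for_tool_py_alt tool
instance (tool : String) (out : String) : Decidable (Spec_focus_for_tool_py tool out) := by unfold Spec_focus_for_tool_py; infer_instance

-- ===== CLAIM (what is proved, stated in full; the proofs are below) =====
def Claim_equal_focus_for_tool_py : Prop := ∀ (tool : String), Dom_focus_for_tool_py tool → Spec_focus_for_tool_py tool (focus_for_tool_py tool)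

-- ===== LEMMAS AND PROOFS =====

-- a singleton prefix is exactly a matching head
theorem singleton_prefix_iff (c : Char) (l : List Char) : [c] <+: l ↔ ∃ r, l = c :: r := by
  constructor
  · rintro ⟨r, hr⟩; exact ⟨r, hr.symm⟩
  · rintro ⟨r, rfl⟩; exact ⟨r, rfl⟩

-- if tool has no '.', no "p." is a prefix of it
theorem start_false (tool : String) (p : List Char)
    (hf : PySem.Chars.find tool.toList ['.'] = -1) :
    PySem.Chars.startswith tool.toList (p ++ ['.']) = false := by
  cases hb : PySem.Chars.startswith tool.toList (p ++ ['.']) with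
  | false => rfl
  | true =>
    exfalso
    obtain ⟨r, hr⟩ := (PySem.Chars.startswith_iff _ _).mp hb
    exact (PySem.Chars.find_eq_neg_one_iff _ _).mp hf ⟨p, r, by simpa [List.append_assoc] using hr⟩

-- if the first '.' of tool is at index n, then "p." (p dot-free) is a prefix of tool
-- exactly when tool's first n characters are p
theorem start_eq_key (tool : String) (p : List Char) (hp : '.' ∉ p) (n : ℕ)
    (hf : PySem.Chars.find tool.toList ['.'] = (n : ℤ)) :
    PySem.Chars.startswith tool.toList (p ++ ['.']) = (tool.toList.take n == p) := by
  have hlen : n ≤ tool.toList.length := by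
    have := PySem.Chars.find_le_length tool.toList ['.']; omega
  have hspec := PySem.Chars.findFrom_natCast_spec tool.toList ['.'] 0 (Nat.zero_le _)
  rw [Nat.cast_zero, PySem.Chars.findFrom_zero, hf] at hspec
  obtain ⟨-, hpre, hmin⟩ := hspec (by omega)
  simp only [Int.toNat_natCast] at hpre hmin
  obtain ⟨r, hr⟩ := (singleton_prefix_iff _ _).mp hpre
  cases hb : (tool.toList.take n == p) with
  | true =>
    have ht : tool.toList.take n = p := by simpa using hb
    apply (PySem.Chars.startswith_iff _ _).mpr
    refine ⟨r, ?_⟩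
    rw [List.append_assoc, List.singleton_append, ← hr, ← ht, List.take_append_drop]
  | false =>
    have ht : tool.toList.take n ≠ p := by simpa using hb
    cases hs : PySem.Chars.startswith tool.toList (p ++ ['.']) with
    | false => rfl
    | true =>
      exfalso
      obtain ⟨r', hr'⟩ := (PySem.Chars.startswith_iff _ _).mp hs
      have hcs : tool.toList = p ++ '.' :: r' := by
        rw [← hr']; simp [List.append_assoc]
      rcases lt_trichotomy n p.length with hlt | heq | hgt
      · -- the first '.' would lie inside p, but p is dot-free
        cases hq : List.drop n p with
        | nil => have := List.drop_eq_nil_iff.mp hq; omega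
        | cons c cr =>
          have h1 : List.drop n tool.toList = c :: (cr ++ '.' :: r') := by
            rw [hcs, List.drop_append_of_le_length (le_of_lt hlt), hq]; simp
          rw [hr] at h1
          have hc : c = '.' := by injection h1 with h1a _; exact h1a.symm
          have hpc : c ∈ p := by
            have h2 := List.take_append_drop n p
            rw [hq] at h2
            rw [← h2]; simp
          exact hp (by rw [← hc]; exact hpc)
      · -- n = p.length: then take n tool = p, contradicting ht
        apply ht
        rw [hcs]
        exact List.take_left' heq.symm
      · -- p.length < n: '.' occurs at p.length, before minimal n
        exact hmin p.length (Nat.zero_le _) hgt ⟨r', by rw [hcs]; simp⟩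

-- Str-level rewrites for the concrete prefixes
theorem strstart_false (tool q : String) (p : List Char)
    (hf : PySem.Chars.find tool.toList ['.'] = -1) (hq : q.toList = p ++ ['.']) :
    PySem.Str.startswith tool q = false := by
  rw [PySem.Str.startswith_eq, hq]; exact start_false tool p hf

theorem strstart_key (tool q : String) (p : List Char) (n : ℕ)
    (hf : PySem.Chars.find tool.toList ['.'] = (n : ℤ)) (hq : q.toList = p ++ ['.']) (hp : '.' ∉ p) :
    PySem.Str.startswith tool q = (tool.toList.take n == p) := by
  rw [PySem.Str.startswith_eq, hq]; exact start_eq_key tool p hp n hf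

-- comparing a dict key literal with the key string = comparing char lists
theorem beq_key (kstr : String) (t : List Char) (hk : kstr.toList = t) (p : String) :
    (p == kstr) = (t == p.toList) := by
  cases hb : (t == p.toList) with
  | true =>
    have : t = p.toList := by simpa using hb
    have : kstr = p := by
      apply String.ext
      change kstr.toList = p.toList
      rw [hk, this]
    simp [this]
  | false =>
    have hne : t ≠ p.toList := by simpa using hb
    have : p ≠ kstr := by
      intro h; exact hne (by rw [← hk, h])
    simpa using this

theorem dotToList : (("." : String)).toList = ['.'] := by decide

-- ===== VERDICT (by name: the statement is the Claim_ definition above) =====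
set_option maxHeartbeats 1600000 in
theorem focus_for_tool_py_spec : Claim_equal_focus_for_tool_py := by
  intro tool _
  unfold Spec_focus_for_tool_py
  by_cases hneg : PySem.Chars.find tool.toList ['.'] = -1
  · -- no '.' in tool: both sides return "browser"
    have hf := hneg
    rw [focus_for_tool_py_alt, PySem.Str.find_eq, dotToList, hf]
    rw [if_pos (by norm_num : (-1 : ℤ) < 0)]
    rw [focus_for_tool_py]
    simp only [pvPrefixes, pvFocusLoop]
    rw [strstart_false tool ("slack" ++ ".") "slack".toList hf (by decide),
      strstart_false tool ("mail" ++ ".") "mail".toList hf (by decide),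
      strstart_false tool ("docs" ++ ".") "docs".toList hf (by decide),
      strstart_false tool ("calendar" ++ ".") "calendar".toList hf (by decide),
      strstart_false tool ("tickets" ++ ".") "tickets".toList hf (by decide),
      strstart_false tool ("erp" ++ ".") "erp".toList hf (by decide),
      strstart_false tool ("crm" ++ ".") "crm".toList hf (by decide),
      strstart_false tool ("db" ++ ".") "db".toList hf (by decide),
      strstart_false tool ("browser" ++ ".") "browser".toList hf (by decide),
      strstart_false tool ("okta" ++ ".") "okta".toList hf (by decide),
      strstart_false tool ("servicedesk" ++ ".") "servicedesk".toList hf (by decide),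
      strstart_false tool ("google_admin" ++ ".") "google_admin".toList hf (by decide),
      strstart_false tool ("siem" ++ ".") "siem".toList hf (by decide),
      strstart_false tool ("datadog" ++ ".") "datadog".toList hf (by decide),
      strstart_false tool ("pagerduty" ++ ".") "pagerduty".toList hf (by decide),
      strstart_false tool ("feature_flags" ++ ".") "feature_flags".toList hf (by decide),
      strstart_false tool ("hris" ++ ".") "hris".toList hf (by decide),
      strstart_false tool ("jira" ++ ".") "jira".toList hf (by decide),
      strstart_false tool "salesforce." "salesforce".toList hf (by decide),
      strstart_false tool "hubspot." "hubspot".toList hf (by decide),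
      strstart_false tool "xero." "xero".toList hf (by decide),
      strstart_false tool "netsuite." "netsuite".toList hf (by decide),
      strstart_false tool "dynamics." "dynamics".toList hf (by decide),
      strstart_false tool "quickbooks." "quickbooks".toList hf (by decide)]
    simp
  · -- first '.' at index n
    have hge : 0 ≤ PySem.Chars.find tool.toList ['.'] := by
      have := PySem.Chars.neg_one_le_find tool.toList ['.']; omega
    obtain ⟨n, hf⟩ : ∃ n : ℕ, PySem.Chars.find tool.toList ['.'] = (n : ℤ) :=
      ⟨(PySem.Chars.find tool.toList ['.']).toNat, (Int.toNat_of_nonneg hge).symm⟩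
    rw [focus_for_tool_py_alt, PySem.Str.find_eq, dotToList, hf]
    have hk : (PySem.Str.slice tool none (some ((n : ℤ)))).toList = tool.toList.take n := by
      rw [PySem.Str.toList_slice, PySem.Chars.slice_eq_listSlice,
        PySem.List.slice_to _ (by positivity), Int.toNat_natCast]
    set kstr := PySem.Str.slice tool none (some ((n : ℤ))) with hkstr
    rw [if_neg (by omega : ¬((n : ℤ) < 0))]
    rw [focus_for_tool_py]
    simp only [pvPrefixes, pvFocusLoop]
    rw [strstart_key tool ("slack" ++ ".") "slack".toList n hf (by decide) (by decide),
      strstart_key tool ("mail" ++ ".") "mail".toList n hf (by decide) (by decide),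
      strstart_key tool ("docs" ++ ".") "docs".toList n hf (by decide) (by decide),
      strstart_key tool ("calendar" ++ ".") "calendar".toList n hf (by decide) (by decide),
      strstart_key tool ("tickets" ++ ".") "tickets".toList n hf (by decide) (by decide),
      strstart_key tool ("erp" ++ ".") "erp".toList n hf (by decide) (by decide),
      strstart_key tool ("crm" ++ ".") "crm".toList n hf (by decide) (by decide),
      strstart_key tool ("db" ++ ".") "db".toList n hf (by decide) (by decide),
      strstart_key tool ("browser" ++ ".") "browser".toList n hf (by decide) (by decide),
      strstart_key tool ("okta" ++ ".") "okta".toList n hf (by decide) (by decide),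
      strstart_key tool ("servicedesk" ++ ".") "servicedesk".toList n hf (by decide) (by decide),
      strstart_key tool ("google_admin" ++ ".") "google_admin".toList n hf (by decide) (by decide),
      strstart_key tool ("siem" ++ ".") "siem".toList n hf (by decide) (by decide),
      strstart_key tool ("datadog" ++ ".") "datadog".toList n hf (by decide) (by decide),
      strstart_key tool ("pagerduty" ++ ".") "pagerduty".toList n hf (by decide) (by decide),
      strstart_key tool ("feature_flags" ++ ".") "feature_flags".toList n hf (by decide) (by decide),
      strstart_key tool ("hris" ++ ".") "hris".toList n hf (by decide) (by decide),
      strstart_key tool ("jira" ++ ".") "jira".toList n hf (by decide) (by decide),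
      strstart_key tool "salesforce." "salesforce".toList n hf (by decide) (by decide),
      strstart_key tool "hubspot." "hubspot".toList n hf (by decide) (by decide),
      strstart_key tool "xero." "xero".toList n hf (by decide) (by decide),
      strstart_key tool "netsuite." "netsuite".toList n hf (by decide) (by decide),
      strstart_key tool "dynamics." "dynamics".toList n hf (by decide) (by decide),
      strstart_key tool "quickbooks." "quickbooks".toList n hf (by decide) (by decide)]
    have hmap : pvFocusMap = (⟨[("slack", "slack"), ("mail", "mail"), ("docs", "docs"), ("calendar", "calendar"), ("tickets", "tickets"), ("erp", "erp"), ("crm", "crm"), ("db", "db"), ("browser", "browser"), ("okta", "okta"), ("servicedesk", "servicedesk"), ("google_admin", "google_admin"), ("siem", "siem"), ("datadog", "datadog"), ("pagerduty", "pagerduty"), ("feature_flags", "feature_flags"), ("hris", "hris"), ("jira", "jira"), ("salesforce", "crm"), ("hubspot", "crm"), ("xero", "erp"), ("netsuite", "erp"), ("dynamics", "erp"), ("quickbooks", "erp")]⟩ : PySem.Dict String String) := by rfl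
    rw [hmap, PySem.Dict.getD_eq_get?_getD]
    simp only [PySem.Dict.get?_mk_cons]
    rw [beq_key kstr _ hk "slack",
      beq_key kstr _ hk "mail",
      beq_key kstr _ hk "docs",
      beq_key kstr _ hk "calendar",
      beq_key kstr _ hk "tickets",
      beq_key kstr _ hk "erp",
      beq_key kstr _ hk "crm",
      beq_key kstr _ hk "db",
      beq_key kstr _ hk "browser",
      beq_key kstr _ hk "okta",
      beq_key kstr _ hk "servicedesk",
      beq_key kstr _ hk "google_admin",
      beq_key kstr _ hk "siem",
      beq_key kstr _ hk "datadog",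
      beq_key kstr _ hk "pagerduty",
      beq_key kstr _ hk "feature_flags",
      beq_key kstr _ hk "hris",
      beq_key kstr _ hk "jira",
      beq_key kstr _ hk "salesforce",
      beq_key kstr _ hk "hubspot",
      beq_key kstr _ hk "xero",
      beq_key kstr _ hk "netsuite",
      beq_key kstr _ hk "dynamics",
      beq_key kstr _ hk "quickbooks"]
    have hget : ((⟨[]⟩ : PySem.Dict String String)).get? kstr = none := rfl
    rw [hget]
    clear hneg hge hf hk hmap hget hkstr
    generalize (List.take n tool.toList == "slack".toList) = b0
    generalize (List.take n tool.toList == "mail".toList) = b1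
    generalize (List.take n tool.toList == "docs".toList) = b2
    generalize (List.take n tool.toList == "calendar".toList) = b3
    generalize (List.take n tool.toList == "tickets".toList) = b4
    generalize (List.take n tool.toList == "erp".toList) = b5
    generalize (List.take n tool.toList == "crm".toList) = b6
    generalize (List.take n tool.toList == "db".toList) = b7
    generalize (List.take n tool.toList == "browser".toList) = b8
    generalize (List.take n tool.toList == "okta".toList) = b9
    generalize (List.take n tool.toList == "servicedesk".toList) = b10
    generalize (List.take n tool.toList == "google_admin".toList) = b11
    generalize (List.take n tool.toList == "siem".toList) = b12
    generalize (List.take n tool.toList == "datadog".toList) = b13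
    generalize (List.take n tool.toList == "pagerduty".toList) = b14
    generalize (List.take n tool.toList == "feature_flags".toList) = b15
    generalize (List.take n tool.toList == "hris".toList) = b16
    generalize (List.take n tool.toList == "jira".toList) = b17
    generalize (List.take n tool.toList == "salesforce".toList) = b18
    generalize (List.take n tool.toList == "hubspot".toList) = b19
    generalize (List.take n tool.toList == "xero".toList) = b20
    generalize (List.take n tool.toList == "netsuite".toList) = b21
    generalize (List.take n tool.toList == "dynamics".toList) = b22
    generalize (List.take n tool.toList == "quickbooks".toList) = b23
    cases b0 with
    | true => rfl
    | false =>
      cases b1 with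
      | true => rfl
      | false =>
        cases b2 with
        | true => rfl
        | false =>
          cases b3 with
          | true => rfl
          | false =>
            cases b4 with
            | true => rfl
            | false =>
              cases b5 with
              | true => rfl
              | false =>
                cases b6 with
                | true => rfl
                | false =>
                  cases b7 with
                  | true => rfl
                  | false =>
                    cases b8 with
                    | true => rfl
                    | false =>
                      cases b9 with
                      | true => rfl
                      | false =>
                        cases b10 with
                        | true => rfl
                        | false =>
                          cases b11 with
                          | true => rfl
                          | false =>
                            cases b12 with
                            | true => rfl
                            | false =>
                              cases b13 with
                              | true => rfl
                              | false =>
                                cases b14 with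
                                | true => rfl
                                | false =>
                                  cases b15 with
                                  | true => rfl
                                  | false =>
                                    cases b16 with
                                    | true => rfl
                                    | false =>
                                      cases b17 with
                                      | true => rfl
                                      | false =>
                                        cases b18 with
                                        | true => rfl
                                        | false =>
                                          cases b19 with
                                          | true => rfl
                                          | false =>
                                            cases b20 with
                                            | true => rfl
                                            | false =>
                                              cases b21 with
                                              | true => rfl
                                              | false =>
                                                cases b22 with
                                                | true => rfl
                                                | false =>
                                                  cases b23 with
                                                  | true => rfl
                                                  | false =>
                                                    rfl
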